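-- pv_equiv track=rewrite | github.com/pedro-pacheco/PL2023 | TPC1/main.py | create_chol_distribution
-- ===== SOURCE A (Python) =====
-- def create_chol_distribution(keys_tuples, chol_list):
-- 	chol_dist = dict()
-- 	for x in keys_tuples:
-- 		a = str(x[0])+'-'+str(x[1])
-- 		chol_dist[a] = 0
--
-- 	for a in chol_list:
-- 		for k in keys_tuples:
-- 			if a in range(k[0], k[1]+1):
-- 				chol_dist[str(k[0])+'-'+str(k[1])] += 1
--
-- 	#removing entries with value 0
-- 	for k in list(chol_dist.keys()):
-- 		if chol_dist[k]==0:
-- 			del chol_dist[k]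
-- 	return chol_dist
-- ===== SOURCE B (Python) =====
-- def _bisect_left(s, x):
--     lo, hi = 0, len(s)
--     while lo < hi:
--         mid = (lo + hi) // 2
--         if s[mid] < x:
--             lo = mid + 1
--         else:
--             hi = mid
--     return lo
--
--
-- def _bisect_right(s, x):
--     lo, hi = 0, len(s)
--     while lo < hi:
--         mid = (lo + hi) // 2
--         if x < s[mid]:
--             hi = mid
--         else:
--             lo = mid + 1
--     return lo
--
--
-- def create_chol_distribution(keys_tuples, chol_list):
--     s = sorted(chol_list)
--     counts = {}
--     for k in keys_tuples:
--         key = str(k[0]) + '-' + str(k[1])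
--         c = _bisect_right(s, k[1]) - _bisect_left(s, k[0])
--         counts[key] = counts.get(key, 0) + max(c, 0)
--     return {k: v for k, v in counts.items() if v != 0}
-- ===== Notes on version B (the rewrite author's own statement) =====
-- stated objective: faster
-- what changed: Instead of testing every cholesterol value against every interval (a nested N*M scan over a dict seeded with zeroes that is pruned afterwards), B sorts the values once and counts each interval's hits with two hand-written binary searches, accumulating per-key and emitting only non-zero bins.
import Mathlib
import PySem

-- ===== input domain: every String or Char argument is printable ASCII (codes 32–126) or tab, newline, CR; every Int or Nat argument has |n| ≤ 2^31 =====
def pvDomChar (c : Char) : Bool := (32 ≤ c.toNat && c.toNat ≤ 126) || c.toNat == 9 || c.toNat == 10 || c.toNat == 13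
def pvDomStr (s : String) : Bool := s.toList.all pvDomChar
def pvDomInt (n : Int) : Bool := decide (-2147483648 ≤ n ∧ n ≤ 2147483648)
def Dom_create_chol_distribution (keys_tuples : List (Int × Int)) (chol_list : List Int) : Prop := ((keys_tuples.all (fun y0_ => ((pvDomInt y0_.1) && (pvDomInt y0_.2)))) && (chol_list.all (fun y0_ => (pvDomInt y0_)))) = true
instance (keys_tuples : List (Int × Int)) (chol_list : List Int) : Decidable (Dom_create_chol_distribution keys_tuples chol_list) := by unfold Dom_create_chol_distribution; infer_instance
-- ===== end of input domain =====

-- B replaces A's nested scan (every value against every interval) by one sort of the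
-- values plus two binary searches per interval; a timing run measures the speed-up.

-- ===== PORT A =====
-- literal port of Source A: seed the dict with 0 per key, nested counting loops
-- ('a in range(k[0], k[1]+1)' is the O(1) membership test k.1 ≤ a ≤ k.2),
-- then delete the zero-valued entries by iterating over a snapshot of the keys.
def create_chol_distribution (keys_tuples : List (Int × Int)) (chol_list : List Int) : List (String × Int) :=
  let d0 : PySem.Dict String Int :=
    keys_tuples.foldl (fun d x =>
      let a := PySem.Int.toStr x.1 ++ "-" ++ PySem.Int.toStr x.2
      d.insert a 0) PySem.Dict.empty
  let d1 :=
    chol_list.foldl (fun d a =>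
      keys_tuples.foldl (fun d k =>
        if k.1 ≤ a ∧ a ≤ k.2 then
          d.modify (PySem.Int.toStr k.1 ++ "-" ++ PySem.Int.toStr k.2) 0 (· + 1)
        else d) d) d0
  let d2 := d1.keys.foldl (fun d k => if d.getD k 0 == 0 then d.erase k else d) d1
  d2.items

-- ===== PORT B =====
-- literal port of Source B: the hand-written while-loops of _bisect_left/_bisect_right
-- become fuel recursions (fuel = len s bounds the number of halving steps; the
-- 'none' index branch is unreachable since lo ≤ mid < hi ≤ len s).
def pyBisectLeftLoop (xs : List Int) (x : Int) : Nat → Nat → Nat → Nat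
  | 0, lo, _ => lo
  | fuel+1, lo, hi =>
    if lo < hi then
      match xs[(lo + hi) / 2]? with
      | some y => if y < x then pyBisectLeftLoop xs x fuel ((lo + hi) / 2 + 1) hi
                  else pyBisectLeftLoop xs x fuel lo ((lo + hi) / 2)
      | none => lo
    else lo

def pyBisectLeft (xs : List Int) (x : Int) : Nat := pyBisectLeftLoop xs x xs.length 0 xs.length

def pyBisectRightLoop (xs : List Int) (x : Int) : Nat → Nat → Nat → Nat
  | 0, lo, _ => lo
  | fuel+1, lo, hi =>
    if lo < hi then
      match xs[(lo + hi) / 2]? with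
      | some y => if x < y then pyBisectRightLoop xs x fuel lo ((lo + hi) / 2)
                  else pyBisectRightLoop xs x fuel ((lo + hi) / 2 + 1) hi
      | none => lo
    else lo

def pyBisectRight (xs : List Int) (x : Int) : Nat := pyBisectRightLoop xs x xs.length 0 xs.length

def create_chol_distribution_alt (keys_tuples : List (Int × Int)) (chol_list : List Int) : List (String × Int) :=
  let s := PySem.List.sorted chol_list id
  let counts : PySem.Dict String Int :=
    keys_tuples.foldl (fun d k =>
      let key := PySem.Int.toStr k.1 ++ "-" ++ PySem.Int.toStr k.2
      let c : Int := (pyBisectRight s k.2 : Int) - (pyBisectLeft s k.1 : Int)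
      d.insert key (d.getD key 0 + max c 0)) PySem.Dict.empty
  counts.items.filter (fun p => p.2 != 0)

-- ===== PRECONDITION & SPEC =====
def Spec_create_chol_distribution (keys_tuples : List (Int × Int)) (chol_list : List Int) (out : List (String × Int)) : Prop := out = create_chol_distribution_alt keys_tuples chol_list
instance (keys_tuples : List (Int × Int)) (chol_list : List Int) (out : List (String × Int)) : Decidable (Spec_create_chol_distribution keys_tuples chol_list out) := by unfold Spec_create_chol_distribution; infer_instance

-- ===== CLAIM (what is proved, stated in full; the proofs are below) =====
def Claim_equal_create_chol_distribution : Prop := ∀ (keys_tuples : List (Int × Int)) (chol_list : List Int), Dom_create_chol_distribution keys_tuples chol_list → Spec_create_chol_distribution keys_tuples chol_list (create_chol_distribution keys_tuples chol_list)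

-- ===== LEMMAS AND PROOFS =====

-- the key string both programs build for an interval
def pvKeyOf (k : Int × Int) : String := PySem.Int.toStr k.1 ++ "-" ++ PySem.Int.toStr k.2

-- B's hand-ported binary-search loops compute the prelude's bisect functions
theorem pyBisectLeftLoop_eq (xs : List Int) (x : Int) :
    ∀ fuel lo hi, pyBisectLeftLoop xs x fuel lo hi = PySem.List.bisectLeftLoop xs x fuel lo hi := by
  intro fuel
  induction fuel with
  | zero => intro lo hi; rfl
  | succ n ih =>
    intro lo hi
    simp only [pyBisectLeftLoop, PySem.List.bisectLeftLoop]
    split_ifs with h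
    · cases hx : xs[(lo + hi) / 2]? with
      | none => rfl
      | some y => simp only; split_ifs <;> apply ih
    · rfl

theorem pyBisectLeft_eq (xs : List Int) (x : Int) : pyBisectLeft xs x = PySem.List.bisectLeft xs x := by
  simp only [pyBisectLeft, PySem.List.bisectLeft, pyBisectLeftLoop_eq]

theorem pyBisectRightLoop_eq (xs : List Int) (x : Int) :
    ∀ fuel lo hi, pyBisectRightLoop xs x fuel lo hi = PySem.List.bisectRightLoop xs x fuel lo hi := by
  intro fuel
  induction fuel with
  | zero => intro lo hi; rfl
  | succ n ih =>
    intro lo hi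
    simp only [pyBisectRightLoop, PySem.List.bisectRightLoop]
    split_ifs with h
    · cases hx : xs[(lo + hi) / 2]? with
      | none => rfl
      | some y => simp only; split_ifs <;> apply ih
    · rfl

theorem pyBisectRight_eq (xs : List Int) (x : Int) : pyBisectRight xs x = PySem.List.bisectRight xs x := by
  simp only [pyBisectRight, PySem.List.bisectRight, pyBisectRightLoop_eq]

theorem bisectLeft_eq_countP (s : List Int) (x : Int) (hs : List.Pairwise (· ≤ ·) s) :
    PySem.List.bisectLeft s x = s.countP (fun a => decide (a < x)) := by
  obtain ⟨hle, hlt, hge⟩ := PySem.List.bisectLeft_spec s x hs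
  set i := PySem.List.bisectLeft s x with hi
  conv_rhs => rw [← List.take_append_drop i s]
  rw [List.countP_append]
  have h1 : (s.take i).countP (fun a => decide (a < x)) = (s.take i).length := by
    rw [List.countP_eq_length]
    intro a ha
    obtain ⟨j, hj, hja⟩ := List.mem_iff_getElem.mp ha
    have hj' : j < i := lt_of_lt_of_le hj (by simp [List.length_take])
    have hjs : j < s.length := lt_of_lt_of_le hj' hle
    have := hlt j hjs hj'
    simp only [List.getElem_take] at hja
    subst hja
    simpa using this
  have h2 : (s.drop i).countP (fun a => decide (a < x)) = 0 := by
    rw [List.countP_eq_zero]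
    intro a ha
    obtain ⟨j, hj, hja⟩ := List.mem_iff_getElem.mp ha
    rw [List.getElem_drop] at hja
    have hjs : i + j < s.length := by simp [List.length_drop] at hj; omega
    have := hge (i + j) hjs (Nat.le_add_right _ _)
    subst hja
    simpa using not_lt.mpr this
  rw [h1, h2, List.length_take]
  omega
theorem bisectRight_eq_countP (s : List Int) (x : Int) (hs : List.Pairwise (· ≤ ·) s) :
    PySem.List.bisectRight s x = s.countP (fun a => decide (a ≤ x)) := by
  obtain ⟨hle, hlt, hge⟩ := PySem.List.bisectRight_spec s x hs
  set i := PySem.List.bisectRight s x with hi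
  conv_rhs => rw [← List.take_append_drop i s]
  rw [List.countP_append]
  have h1 : (s.take i).countP (fun a => decide (a ≤ x)) = (s.take i).length := by
    rw [List.countP_eq_length]
    intro a ha
    obtain ⟨j, hj, hja⟩ := List.mem_iff_getElem.mp ha
    have hj' : j < i := lt_of_lt_of_le hj (by simp [List.length_take])
    have hjs : j < s.length := lt_of_lt_of_le hj' hle
    have := hlt j hjs hj'
    simp only [List.getElem_take] at hja
    subst hja
    simpa using this
  have h2 : (s.drop i).countP (fun a => decide (a ≤ x)) = 0 := by
    rw [List.countP_eq_zero]
    intro a ha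
    obtain ⟨j, hj, hja⟩ := List.mem_iff_getElem.mp ha
    rw [List.getElem_drop] at hja
    have hjs : i + j < s.length := by simp [List.length_drop] at hj; omega
    have := hge (i + j) hjs (Nat.le_add_right _ _)
    subst hja
    simpa using not_le.mpr this
  rw [h1, h2, List.length_take]
  omega

theorem bisect_range_count (s : List Int) (lo hi : Int)
    (hl : PySem.List.bisectLeft s lo = s.countP (fun a => decide (a < lo)))
    (hr : PySem.List.bisectRight s hi = s.countP (fun a => decide (a ≤ hi))) :
    max ((PySem.List.bisectRight s hi : Int) - (PySem.List.bisectLeft s lo : Int)) 0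
      = (s.countP (fun a => decide (lo ≤ a ∧ a ≤ hi)) : Int) := by
  rw [hl, hr]
  by_cases h : lo ≤ hi
  · have key : ∀ t : List Int, t.countP (fun a => decide (a ≤ hi))
        = t.countP (fun a => decide (a < lo)) + t.countP (fun a => decide (lo ≤ a ∧ a ≤ hi)) := by
      intro t
      induction t with
      | nil => simp
      | cons b t ih =>
        simp only [List.countP_cons, ih]
        split_ifs <;> simp_all <;> omega
    rw [key s]
    push_cast
    omega
  · have h0 : s.countP (fun a => decide (lo ≤ a ∧ a ≤ hi)) = 0 := by
      rw [List.countP_eq_zero]; intro a _; simp; omega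
    have hmono : s.countP (fun a => decide (a ≤ hi)) ≤ s.countP (fun a => decide (a < lo)) := by
      apply List.countP_mono_left
      intro a _ ha
      simp at ha ⊢; omega
    rw [h0]
    push_cast
    omega


theorem getD_seed_zero (l : List (Int × Int)) :
    ∀ (d : PySem.Dict String Int), (∀ key, d.getD key 0 = 0) →
    ∀ key, (l.foldl (fun d x => d.insert (pvKeyOf x) 0) d).getD key 0 = 0 := by
  induction l with
  | nil => intro d h key; exact h key
  | cons x l ih =>
    intro d h key
    refine ih _ (fun key => ?_) key
    rw [PySem.Dict.getD_insert]
    split_ifs <;> [rfl; exact h key]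

theorem getD_inner (l : List (Int × Int)) (a : Int) :
    ∀ (d : PySem.Dict String Int) (key : String),
    (l.foldl (fun d k => if k.1 ≤ a ∧ a ≤ k.2 then d.modify (pvKeyOf k) 0 (· + 1) else d) d).getD key 0
      = d.getD key 0 + (l.countP (fun k => decide (k.1 ≤ a ∧ a ≤ k.2) && (pvKeyOf k == key)) : Int) := by
  induction l with
  | nil => intro d key; simp
  | cons k l ih =>
    intro d key
    rw [List.foldl_cons, List.countP_cons]
    by_cases hc : k.1 ≤ a ∧ a ≤ k.2
    · rw [if_pos hc, ih, PySem.Dict.getD_modify]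
      by_cases hk : key = pvKeyOf k
      · subst hk
        have hb : (decide (k.1 ≤ a ∧ a ≤ k.2) && (pvKeyOf k == pvKeyOf k)) = true := by
          simp [hc]
        simp only [hb, if_true]
        push_cast; ring
      · have hb : (decide (k.1 ≤ a ∧ a ≤ k.2) && (pvKeyOf k == key)) = false := by
          simp [Ne.symm hk]
        simp only [hb, if_neg hk, Bool.false_eq_true, if_false]
        push_cast; ring
    · rw [if_neg hc, ih]
      have hb : (decide (k.1 ≤ a ∧ a ≤ k.2) && (pvKeyOf k == key)) = false := by
        simp [hc]
      simp only [hb, Bool.false_eq_true, if_false]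
      push_cast; ring

theorem getD_outer (cl : List Int) (kt : List (Int × Int)) :
    ∀ (d : PySem.Dict String Int) (key : String),
    (cl.foldl (fun d a => kt.foldl (fun d k => if k.1 ≤ a ∧ a ≤ k.2 then d.modify (pvKeyOf k) 0 (· + 1) else d) d) d).getD key 0
      = d.getD key 0 + (cl.map (fun a => (kt.countP (fun k => decide (k.1 ≤ a ∧ a ≤ k.2) && (pvKeyOf k == key)) : Int))).sum := by
  induction cl with
  | nil => intro d key; simp
  | cons a cl ih =>
    intro d key
    rw [List.foldl_cons, List.map_cons, List.sum_cons, ih, getD_inner]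
    ring

theorem getD_acc (val : (Int × Int) → Int) (l : List (Int × Int)) :
    ∀ (d : PySem.Dict String Int) (key : String),
    (l.foldl (fun d k => d.insert (pvKeyOf k) (d.getD (pvKeyOf k) 0 + val k)) d).getD key 0
      = d.getD key 0 + (l.map (fun k => if pvKeyOf k = key then val k else 0)).sum := by
  induction l with
  | nil => intro d key; simp
  | cons k l ih =>
    intro d key
    rw [List.foldl_cons, List.map_cons, List.sum_cons, ih, PySem.Dict.getD_insert]
    by_cases hk : key = pvKeyOf k
    · simp [hk]; ring
    · simp [hk, Ne.symm hk]

theorem exchange (kt : List (Int × Int)) (cl : List Int) (key : String) :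
    (cl.map (fun a => (kt.countP (fun k => decide (k.1 ≤ a ∧ a ≤ k.2) && (pvKeyOf k == key)) : Int))).sum
      = (kt.map (fun k => if pvKeyOf k = key then (cl.countP (fun a => decide (k.1 ≤ a ∧ a ≤ k.2)) : Int) else 0)).sum := by
  induction kt with
  | nil => simp
  | cons k kt ih =>
    rw [List.map_cons, List.sum_cons, ← ih]
    have split : ∀ a : Int, ((List.countP (fun k => decide (k.1 ≤ a ∧ a ≤ k.2) && (pvKeyOf k == key)) (k :: kt) : Int))
        = (if (fun k : Int × Int => decide (k.1 ≤ a ∧ a ≤ k.2) && (pvKeyOf k == key)) k then 1 else 0)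
          + (List.countP (fun k => decide (k.1 ≤ a ∧ a ≤ k.2) && (pvKeyOf k == key)) kt : Int) := by
      intro a; rw [List.countP_cons]; push_cast; split_ifs <;> ring
    simp only [split]
    rw [PySem.List.sum_map_add_int]
    congr 1
    by_cases hk : pvKeyOf k = key
    · have hb : (pvKeyOf k == key) = true := by simp [hk]
      rw [if_pos hk]
      simp only [hb, Bool.and_true]
      exact PySem.List.sum_map_ite_one_zero (fun a => decide (k.1 ≤ a ∧ a ≤ k.2)) cl
    · have hb : (pvKeyOf k == key) = false := by simp [hk]
      simp [hb, hk]


-- the counting loop never creates a key: every modified key is already present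
theorem keys_inner (l : List (Int × Int)) (a : Int) :
    ∀ (d : PySem.Dict String Int), (∀ k ∈ l, d.contains (pvKeyOf k) = true) →
    (l.foldl (fun d k => if k.1 ≤ a ∧ a ≤ k.2 then d.modify (pvKeyOf k) 0 (· + 1) else d) d).keys = d.keys := by
  induction l with
  | nil => intro d _; rfl
  | cons k l ih =>
    intro d h
    rw [List.foldl_cons]
    by_cases hc : k.1 ≤ a ∧ a ≤ k.2
    · rw [if_pos hc]
      have hk : (d.modify (pvKeyOf k) 0 (· + 1)).keys = d.keys := by
        rw [PySem.Dict.keys_modify, PySem.Dict.keys_insert_of_contains _ _ (h k (List.mem_cons_self))]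
      rw [ih _ (fun k' hk' => ?_), hk]
      rw [PySem.Dict.contains_eq_decide_mem_keys, hk, ← PySem.Dict.contains_eq_decide_mem_keys]
      exact h k' (List.mem_cons_of_mem _ hk')
    · rw [if_neg hc]
      exact ih _ (fun k' hk' => h k' (List.mem_cons_of_mem _ hk'))

theorem keys_outer (cl : List Int) (kt : List (Int × Int)) :
    ∀ (d : PySem.Dict String Int), (∀ k ∈ kt, d.contains (pvKeyOf k) = true) →
    (cl.foldl (fun d a => kt.foldl (fun d k => if k.1 ≤ a ∧ a ≤ k.2 then d.modify (pvKeyOf k) 0 (· + 1) else d) d) d).keys = d.keys := by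
  induction cl with
  | nil => intro d _; rfl
  | cons a cl ih =>
    intro d h
    rw [List.foldl_cons]
    have hk := keys_inner kt a d h
    rw [ih _ (fun k' hk' => ?_), hk]
    rw [PySem.Dict.contains_eq_decide_mem_keys, hk, ← PySem.Dict.contains_eq_decide_mem_keys]
    exact h k' hk'

-- deleting the zero-valued keys (iterating over a snapshot of distinct keys) filters the items
theorem erase_fold_filter (ks : List String) :
    ∀ (d : PySem.Dict String Int), d.keys.Nodup →
    (ks.foldl (fun d k => if d.getD k 0 == 0 then d.erase k else d) d).items
      = d.items.filter (fun p => !(decide (p.1 ∈ ks)) || !(p.2 == 0)) := by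
  induction ks with
  | nil => intro d _; simp
  | cons k ks ih =>
    intro d hnd
    rw [List.foldl_cons]
    by_cases hz : d.getD k 0 = 0
    · rw [if_pos (by simp [hz])]
      have hitems : (d.erase k).items = d.items.filter (fun p => !(p.1 == k)) := rfl
      have hnd' : (d.erase k).keys.Nodup := by
        have : (d.erase k).keys.Sublist d.keys := by
          simp only [PySem.Dict.keys, hitems]
          exact List.Sublist.map _ (List.filter_sublist)
        exact this.nodup hnd
      rw [ih _ hnd', hitems, List.filter_filter]
      apply List.filter_congr
      intro p hp
      by_cases hpk : p.1 = k
      · have hp2 : p.2 = 0 := by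
          have := PySem.Dict.getD_of_mem_items d (by rw [← hpk] at *; exact hp) hnd 0
          rw [hpk] at this; omega
        simp [hpk, hp2]
      · simp [hpk]
    · rw [if_neg (by simp [hz])]
      rw [ih _ hnd]
      apply List.filter_congr
      intro p hp
      by_cases hpk : p.1 = k
      · have hp2 : p.2 ≠ 0 := by
          have := PySem.Dict.getD_of_mem_items d (by rw [← hpk] at *; exact hp) hnd 0
          rw [hpk] at this; omega
        simp [hpk, hp2]
      · simp [hpk]


-- the loops of the two ports, re-read through pvKeyOf (definitionally equal)
def pvSeed (kt : List (Int × Int)) : PySem.Dict String Int :=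
  kt.foldl (fun d x => d.insert (pvKeyOf x) 0) PySem.Dict.empty

def pvD1 (kt : List (Int × Int)) (cl : List Int) : PySem.Dict String Int :=
  cl.foldl (fun d a => kt.foldl (fun d k => if k.1 ≤ a ∧ a ≤ k.2 then d.modify (pvKeyOf k) 0 (· + 1) else d) d) (pvSeed kt)

def pvVal (cl : List Int) (k : Int × Int) : Int :=
  max ((pyBisectRight (PySem.List.sorted cl id) k.2 : Int) - (pyBisectLeft (PySem.List.sorted cl id) k.1 : Int)) 0

def pvCounts (kt : List (Int × Int)) (cl : List Int) : PySem.Dict String Int :=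
  kt.foldl (fun d k => d.insert (pvKeyOf k) (d.getD (pvKeyOf k) 0 + pvVal cl k)) PySem.Dict.empty

theorem A_unfold (kt : List (Int × Int)) (cl : List Int) :
    create_chol_distribution kt cl =
      ((pvD1 kt cl).keys.foldl (fun d k => if d.getD k 0 == 0 then d.erase k else d) (pvD1 kt cl)).items := by
  rfl

theorem B_unfold (kt : List (Int × Int)) (cl : List Int) :
    create_chol_distribution_alt kt cl = (pvCounts kt cl).items.filter (fun p => p.2 != 0) := by
  rfl

-- the clamped bisect difference is exactly the in-range count over chol_list
theorem pvVal_eq_count (cl : List Int) (k : Int × Int) :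
    pvVal cl k = (cl.countP (fun a => decide (k.1 ≤ a ∧ a ≤ k.2)) : Int) := by
  have hs : List.Pairwise (· ≤ ·) (PySem.List.sorted cl id) := by
    simpa using PySem.List.sorted_pairwise cl id
  have hperm : (PySem.List.sorted cl id).Perm cl := PySem.List.sorted_perm cl id false
  unfold pvVal
  rw [pyBisectRight_eq, pyBisectLeft_eq,
    bisect_range_count (PySem.List.sorted cl id) k.1 k.2
      (bisectLeft_eq_countP _ k.1 hs) (bisectRight_eq_countP _ k.2 hs)]
  congr 1
  exact hperm.countP_eq _

-- the dict A has built after its counting loops is B's dict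
theorem d1_eq_counts (kt : List (Int × Int)) (cl : List Int) : pvD1 kt cl = pvCounts kt cl := by
  have hd0keys : (pvSeed kt).keys = PySem.Set.update (PySem.Dict.empty : PySem.Dict String Int).keys (kt.map pvKeyOf) :=
    PySem.Dict.keys_foldl_insert_key kt pvKeyOf (fun _ _ => 0) PySem.Dict.empty
  have hckeys : (pvCounts kt cl).keys = PySem.Set.update (PySem.Dict.empty : PySem.Dict String Int).keys (kt.map pvKeyOf) :=
    PySem.Dict.keys_foldl_insert_key kt pvKeyOf (fun d k => d.getD (pvKeyOf k) 0 + pvVal cl k) PySem.Dict.empty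
  have hcont : ∀ k ∈ kt, (pvSeed kt).contains (pvKeyOf k) = true := by
    intro k hk
    rw [PySem.Dict.contains_eq_decide_mem_keys, hd0keys]
    simp only [decide_eq_true_eq]
    rw [PySem.Set.mem_update]
    exact Or.inr (List.mem_map_of_mem hk)
  have hkeys10 : (pvD1 kt cl).keys = (pvSeed kt).keys := keys_outer cl kt (pvSeed kt) hcont
  have hnd0 : (pvSeed kt).keys.Nodup :=
    PySem.Dict.nodup_keys_foldl_insert_key kt pvKeyOf (fun _ _ => 0) PySem.Dict.empty PySem.Dict.nodup_keys_empty
  have hnd1 : (pvD1 kt cl).keys.Nodup := by rw [hkeys10]; exact hnd0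
  have hndc : (pvCounts kt cl).keys.Nodup :=
    PySem.Dict.nodup_keys_foldl_insert_key kt pvKeyOf _ PySem.Dict.empty PySem.Dict.nodup_keys_empty
  have hgetD : ∀ key, (pvD1 kt cl).getD key 0 = (pvCounts kt cl).getD key 0 := by
    intro key
    unfold pvD1 pvCounts
    rw [getD_outer cl kt (pvSeed kt) key]
    unfold pvSeed
    rw [getD_seed_zero kt PySem.Dict.empty (fun key => PySem.Dict.getD_empty key 0) key,
      exchange kt cl key,
      getD_acc (pvVal cl) kt PySem.Dict.empty key,
      PySem.Dict.getD_empty]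
    simp only [pvVal_eq_count]
  apply PySem.Dict.ext
  rw [PySem.Dict.items_eq_map_keys (pvD1 kt cl) hnd1 0, PySem.Dict.items_eq_map_keys (pvCounts kt cl) hndc 0,
    hkeys10, hd0keys, ← hckeys]
  exact List.map_congr_left (fun key _ => by rw [hgetD])

theorem d1_nodup (kt : List (Int × Int)) (cl : List Int) : (pvD1 kt cl).keys.Nodup := by
  have hd0keys : (pvSeed kt).keys = PySem.Set.update (PySem.Dict.empty : PySem.Dict String Int).keys (kt.map pvKeyOf) :=
    PySem.Dict.keys_foldl_insert_key kt pvKeyOf (fun _ _ => 0) PySem.Dict.empty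
  have hcont : ∀ k ∈ kt, (pvSeed kt).contains (pvKeyOf k) = true := by
    intro k hk
    rw [PySem.Dict.contains_eq_decide_mem_keys, hd0keys]
    simp only [decide_eq_true_eq]
    rw [PySem.Set.mem_update]
    exact Or.inr (List.mem_map_of_mem hk)
  have hkeys10 : (pvD1 kt cl).keys = (pvSeed kt).keys := keys_outer cl kt (pvSeed kt) hcont
  rw [hkeys10]
  exact PySem.Dict.nodup_keys_foldl_insert_key kt pvKeyOf (fun _ _ => 0) PySem.Dict.empty PySem.Dict.nodup_keys_empty

-- ===== VERDICT (by name: the statement is the Claim_ definition above) =====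
theorem create_chol_distribution_spec : Claim_equal_create_chol_distribution := by
  intro kt cl _
  unfold Spec_create_chol_distribution
  rw [A_unfold, B_unfold, erase_fold_filter (pvD1 kt cl).keys (pvD1 kt cl) (d1_nodup kt cl),
    ← d1_eq_counts]
  apply List.filter_congr
  intro p hp
  have hmem : p.1 ∈ (pvD1 kt cl).keys := PySem.Dict.mem_keys_of_mem_items (pvD1 kt cl) hp
  simp [hmem, bne]
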